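-- pv_equiv track=rewrite | github.com/8fdafs2/Codewars-Solu-Python | src/kyu6_Consecutive_Strings.py | longest_consec_01
-- ===== SOURCE A (Python) =====
-- def longest_consec_01(strarr, k):
--     lens = [len(s) for s in strarr]
--     len_lens = len(lens)
--     if len_lens == 0 or k > len_lens or k <= 0:
--         return ''
--     if k == 1:
--         return strarr[lens.index(max(lens))]
--     sums = [sum(lens[i:i + k]) for i in range(len_lens - k + 1)]
--     i = sums.index(max(sums))
--     return ''.join(strarr[i:i + k])
-- ===== SOURCE B (Python) =====
-- def longest_consec_01(strarr, k):
--     n = len(strarr)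
--     if n == 0 or k > n or k <= 0:
--         return ''
--     cur = sum(len(s) for s in strarr[:k])
--     best = cur
--     best_i = 0
--     for i in range(1, n - k + 1):
--         cur = cur + len(strarr[i + k - 1]) - len(strarr[i - 1])
--         if cur > best:
--             best = cur
--             best_i = i
--     return ''.join(strarr[best_i:best_i + k])
-- ===== Notes on version B (the rewrite author's own statement) =====
-- stated objective: faster
-- what changed: Replaces the O(n*k) recomputation of every window sum (plus a separate k==1 branch using lens.index(max(lens))) by a single O(n) sliding-window pass keeping a running sum and the first strict-maximum index.
import Mathlib
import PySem

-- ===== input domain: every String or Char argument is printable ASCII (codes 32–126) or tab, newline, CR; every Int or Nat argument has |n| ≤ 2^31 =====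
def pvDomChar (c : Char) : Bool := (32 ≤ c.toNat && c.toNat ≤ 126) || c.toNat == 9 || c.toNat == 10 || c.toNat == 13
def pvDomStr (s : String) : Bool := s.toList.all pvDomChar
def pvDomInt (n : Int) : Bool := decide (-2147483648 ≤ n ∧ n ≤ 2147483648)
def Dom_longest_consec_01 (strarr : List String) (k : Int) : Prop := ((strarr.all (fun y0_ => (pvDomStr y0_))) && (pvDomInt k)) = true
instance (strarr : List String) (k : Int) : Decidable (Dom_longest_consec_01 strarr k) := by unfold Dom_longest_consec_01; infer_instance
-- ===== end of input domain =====

-- B replaces A's O(n*k) per-window sum recomputation (and A's separate k==1 branch) by one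
-- O(n) sliding-window pass with a running sum and first-strict-max argmax.

-- ===== PORT A =====
def longest_consec_01 (strarr : List String) (k : Int) : String :=
  let lens := strarr.map (fun s => PySem.Str.len s)
  let len_lens : Int := (lens.length : Int)
  if len_lens = 0 ∨ k > len_lens ∨ k ≤ 0 then ""
  else if k = 1 then
    match PySem.List.max? lens (fun x => x) with
    | none => ""
    | some m =>
      match PySem.List.index? lens m with
      | none => ""
      | some i => (PySem.List.pyGet? strarr (i : Int)).getD ""
  else
    let sums := (PySem.List.pyRange 0 (len_lens - k + 1) 1).map
      (fun i => (PySem.List.slice lens (some i) (some (i + k))).sum)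
    match PySem.List.max? sums (fun x => x) with
    | none => ""
    | some m =>
      match PySem.List.index? sums m with
      | none => ""
      | some i => PySem.Str.join "" (PySem.List.slice strarr (some (i : Int)) (some ((i : Int) + k)))

-- ===== PORT B =====
def longest_consec_01_alt (strarr : List String) (k : Int) : String :=
  let n : Int := (strarr.length : Int)
  if n = 0 ∨ k > n ∨ k ≤ 0 then ""
  else
    let cur0 := ((PySem.List.slice strarr none (some k)).map (fun s => PySem.Str.len s)).sum
    let st := (PySem.List.pyRange 1 (n - k + 1) 1).foldl
      (fun (st : Int × Int × Int) i =>
        let cur := st.1 + PySem.Str.len (PySem.List.pyGetD strarr (i + k - 1) "")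
                        - PySem.Str.len (PySem.List.pyGetD strarr (i - 1) "")
        if cur > st.2.1 then (cur, cur, i) else (cur, st.2.1, st.2.2))
      (cur0, cur0, 0)
    PySem.Str.join "" (PySem.List.slice strarr (some st.2.2) (some (st.2.2 + k)))

-- ===== PRECONDITION & SPEC =====
def Spec_longest_consec_01 (strarr : List String) (k : Int) (out : String) : Prop := out = longest_consec_01_alt strarr k
instance (strarr : List String) (k : Int) (out : String) : Decidable (Spec_longest_consec_01 strarr k out) := by unfold Spec_longest_consec_01; infer_instance

-- ===== CLAIM (what is proved, stated in full; the proofs are below) =====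
def Claim_equal_longest_consec_01 : Prop := ∀ (strarr : List String) (k : Int), Dom_longest_consec_01 strarr k → Spec_longest_consec_01 strarr k (longest_consec_01 strarr k)

-- ===== LEMMAS AND PROOFS =====

-- window sum: sum of lengths of strarr[j : j+kn]
def pvS (strarr : List String) (kn j : Nat) : Int :=
  (((strarr.map PySem.Str.len).drop j).take kn).sum

lemma pvS_succ (strarr : List String) (kn j : Nat) (hk : 1 ≤ kn)
    (h : j + kn < strarr.length) :
    pvS strarr kn (j + 1)
      = pvS strarr kn j + PySem.Str.len (strarr.getD (j + kn) "")
          - PySem.Str.len (strarr.getD j "") := by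
  have hj : j < strarr.length := by omega
  have hlen : (strarr.map PySem.Str.len).length = strarr.length := by simp
  obtain ⟨kn', rfl⟩ : ∃ kn', kn = kn' + 1 := ⟨kn - 1, by omega⟩
  have h1 : (strarr.map PySem.Str.len).drop j
      = (strarr.map PySem.Str.len)[j] :: (strarr.map PySem.Str.len).drop (j+1) :=
    List.drop_eq_getElem_cons (by omega)
  have h2 : ((strarr.map PySem.Str.len).drop (j+1)).take (kn'+1)
      = ((strarr.map PySem.Str.len).drop (j+1)).take kn'
        ++ [(strarr.map PySem.Str.len)[j+(kn'+1)]'(by omega)] := by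
    rw [List.take_add_one]
    congr 1
    rw [List.getElem?_drop, List.getElem?_eq_getElem (by omega)]
    simp only [Option.toList_some]
    congr 2
    omega
  unfold pvS
  rw [h1, List.take_succ_cons, h2]
  have e1 : strarr.getD (j + (kn'+1)) "" = strarr[j + (kn'+1)] := List.getD_eq_getElem _ _ (by omega)
  have e2 : strarr.getD j "" = strarr[j] := List.getD_eq_getElem _ _ hj
  rw [e1, e2]
  simp [List.sum_append]
  ring

lemma pvS_one (strarr : List String) (j : Nat) (h : j < strarr.length) :
    pvS strarr 1 j = PySem.Str.len strarr[j] := by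
  unfold pvS
  rw [List.drop_eq_getElem_cons (by simp; omega)]
  simp

-- B's sliding-window loop invariant: after m steps the state is
-- (current window sum, best sum, first index achieving it)
lemma pv_loop_inv (strarr : List String) (kn : Nat) (hk : 1 ≤ kn)
    (hkle : kn ≤ strarr.length) :
    ∀ m, m ≤ strarr.length - kn →
    ∃ b : Nat,
      ((List.range m).foldl
        (fun (st : Int × Int × Int) (t : Nat) =>
          let cur := st.1 + PySem.Str.len (PySem.List.pyGetD strarr (1 + (t : Int) + (kn : Int) - 1) "")
                          - PySem.Str.len (PySem.List.pyGetD strarr (1 + (t : Int) - 1) "")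
          if cur > st.2.1 then (cur, cur, 1 + (t : Int)) else (cur, st.2.1, st.2.2))
        (pvS strarr kn 0, pvS strarr kn 0, 0))
      = (pvS strarr kn m, pvS strarr kn b, (b : Int)) ∧ b ≤ m ∧
        (∀ j ≤ m, pvS strarr kn j ≤ pvS strarr kn b) ∧
        (∀ j < b, pvS strarr kn j < pvS strarr kn b) := by
  intro m
  induction m with
  | zero =>
    intro _
    refine ⟨0, by simp, le_refl 0, fun j hj => ?_, fun j hj => by omega⟩
    have : j = 0 := by omega
    simp [this]
  | succ m ih =>
    intro hm1
    obtain ⟨b, hst, hble, hmax, hfst⟩ := ih (by omega)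
    rw [List.range_succ, List.foldl_append, hst, List.foldl_cons, List.foldl_nil]
    have hi1 : (1 + (m : Int) + (kn : Int) - 1) = ((m + kn : Nat) : Int) := by push_cast; ring
    have hi2 : (1 + (m : Int) - 1) = ((m : Nat) : Int) := by ring
    simp only [hi1, hi2, PySem.List.pyGetD_natCast]
    have hcur : pvS strarr kn m + PySem.Str.len (strarr.getD (m + kn) "")
        - PySem.Str.len (strarr.getD m "") = pvS strarr kn (m+1) :=
      (pvS_succ strarr kn m hk (by omega)).symm
    rw [hcur]
    by_cases hc : pvS strarr kn (m+1) > pvS strarr kn b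
    · rw [if_pos hc]
      refine ⟨m+1, by push_cast; ring_nf, le_refl _, fun j hj => ?_, fun j hj => ?_⟩
      · rcases Nat.lt_or_ge j (m+1) with h | h
        · exact le_of_lt (lt_of_le_of_lt (hmax j (by omega)) hc)
        · have : j = m+1 := by omega
          simp [this]
      · exact lt_of_le_of_lt (hmax j (by omega)) hc
    · rw [if_neg hc]
      refine ⟨b, rfl, by omega, fun j hj => ?_, hfst⟩
      rcases Nat.lt_or_ge j (m+1) with h | h
      · exact hmax j (by omega)
      · have : j = m+1 := by omega
        rw [this]
        omega

-- A's index(max(...)) on a list l whose entries are pvS values picks the same index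
lemma pv_argmax_unique (l : List Int) (m : Int) (i b : Nat)
    (hi : PySem.List.index? l m = some i)
    (hmax : ∀ y ∈ l, y ≤ m)
    (hb : b < l.length) (hbm : ∀ j, (hj : j < l.length) → l[j] ≤ l[b])
    (hbf : ∀ j, (hj : j < l.length) → j < b → l[j] < l[b]) :
    b = i := by
  obtain ⟨hil, hli, hfirst⟩ := PySem.List.getElem_of_index?_eq_some hi
  have hbl : l[b] ≤ m := hmax _ (List.getElem_mem hb)
  have hmb : m ≤ l[b] := by rw [← hli]; exact hbm i hil
  have hbm' : l[b] = m := le_antisymm hbl hmb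
  rcases lt_trichotomy b i with h | h | h
  · exact absurd hbm' (hfirst b h)
  · exact h
  · have := hbf i hil h
    rw [hli, hbm'] at this
    exact absurd this (lt_irrefl m)

lemma pv_join_singleton (s : String) : PySem.Str.join "" [s] = s := by
  have h := PySem.Chars.join_singleton "".toList s.toList
  simp [PySem.Str.join] at h ⊢

set_option maxHeartbeats 2000000 in
theorem pv_main : ∀ (strarr : List String) (k : Int),
    longest_consec_01 strarr k = longest_consec_01_alt strarr k := by
  intro strarr k
  by_cases h0 : ((strarr.length : Int) = 0 ∨ k > (strarr.length : Int) ∨ k ≤ 0)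
  · unfold longest_consec_01 longest_consec_01_alt
    simp only [List.length_map]
    rw [if_pos h0, if_pos h0]
  · have hN0 : (strarr.length : Int) ≠ 0 := fun h => h0 (Or.inl h)
    have hkN : k ≤ (strarr.length : Int) := le_of_not_gt fun h => h0 (Or.inr (Or.inl h))
    have hkpos : 0 < k := lt_of_not_ge fun h => h0 (Or.inr (Or.inr h))
    obtain ⟨kn, rfl⟩ : ∃ kn : Nat, k = (kn : Int) := ⟨k.toNat, (Int.toNat_of_nonneg (by omega)).symm⟩
    have hk1 : 1 ≤ kn := by exact_mod_cast hkpos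
    have hkle : kn ≤ strarr.length := by exact_mod_cast hkN
    obtain ⟨b, hst, hble, hmaxB, hfstB⟩ :=
      pv_loop_inv strarr kn hk1 hkle (strarr.length - kn) (le_refl _)
    -- B's value
    have hcur0 : ((PySem.List.slice strarr none (some (kn : Int))).map
        (fun s => PySem.Str.len s)).sum = pvS strarr kn 0 := by
      rw [PySem.List.slice_to_natCast]
      unfold pvS
      rw [List.drop_zero, List.map_take]
    have htn : (((strarr.length : Int)) - (kn : Int) + 1 - 1).toNat = strarr.length - kn := by omega
    have hrange : PySem.List.pyRange 1 ((strarr.length : Int) - (kn : Int) + 1) 1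
        = List.map (fun t : Nat => 1 + (t : Int)) (List.range (strarr.length - kn)) := by
      rw [PySem.List.pyRange_one, htn]
    have h2 : (PySem.List.pyRange 1 ((strarr.length : Int) - (kn : Int) + 1) 1).foldl
        (fun (st : Int × Int × Int) i =>
          let cur := st.1 + PySem.Str.len (PySem.List.pyGetD strarr (i + (kn : Int) - 1) "")
                          - PySem.Str.len (PySem.List.pyGetD strarr (i - 1) "")
          if cur > st.2.1 then (cur, cur, i) else (cur, st.2.1, st.2.2))
        (((PySem.List.slice strarr none (some (kn : Int))).map (fun s => PySem.Str.len s)).sum,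
         ((PySem.List.slice strarr none (some (kn : Int))).map (fun s => PySem.Str.len s)).sum, 0)
        = (pvS strarr kn (strarr.length - kn), pvS strarr kn b, (b : Int)) := by
      rw [hcur0, hrange, List.foldl_map]
      exact hst
    have hBval : longest_consec_01_alt strarr (kn : Int)
        = PySem.Str.join "" (PySem.List.slice strarr (some (b : Int)) (some ((b : Int) + (kn : Int)))) := by
      unfold longest_consec_01_alt
      rw [if_neg h0]
      exact congrArg (fun p : Int × Int × Int =>
        PySem.Str.join "" (PySem.List.slice strarr (some p.2.2) (some (p.2.2 + (kn : Int))))) h2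
    rw [hBval]
    by_cases hko : (kn : Int) = 1
    · -- k == 1 branch of A
      have hkn1 : kn = 1 := by exact_mod_cast hko
      subst hkn1
      rcases hmx : PySem.List.max? (strarr.map (fun s => PySem.Str.len s)) (fun x => x) with _ | m
      · rw [PySem.List.max?_eq_none_iff, List.map_eq_nil_iff] at hmx
        subst hmx
        simp at hN0
      rcases hix : PySem.List.index? (strarr.map (fun s => PySem.Str.len s)) m with _ | i
      · exfalso
        have hmem := PySem.List.max?_mem hmx
        have := (PySem.List.index?_isSome_iff (strarr.map (fun s => PySem.Str.len s)) m).2 hmem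
        rw [hix] at this
        simp at this
      have hAval : longest_consec_01 strarr ((1 : Nat) : Int)
          = (PySem.List.pyGet? strarr (i : Int)).getD "" := by
        unfold longest_consec_01
        simp only [List.length_map]
        rw [if_neg h0, if_pos hko, hmx]
        show (match PySem.List.index? (strarr.map (fun s => PySem.Str.len s)) m with
          | none => ""
          | some i => (PySem.List.pyGet? strarr (i : Int)).getD "") = _
        rw [hix]
      rw [hAval]
      have hmax := PySem.List.max?_isMax hmx
      have hb : b = i := by
        refine pv_argmax_unique (strarr.map (fun s => PySem.Str.len s)) m i b hix hmax ?_ ?_ ?_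
        · simp only [List.length_map]
          omega
        · intro j hj
          have hj' : j < strarr.length := by simpa using hj
          have hb' : b < strarr.length := by omega
          rw [List.getElem_map, List.getElem_map, ← pvS_one strarr j hj', ← pvS_one strarr b hb']
          exact hmaxB j (by omega)
        · intro j hj hjb
          have hj' : j < strarr.length := by simpa using hj
          have hb' : b < strarr.length := by omega
          rw [List.getElem_map, List.getElem_map, ← pvS_one strarr j hj', ← pvS_one strarr b hb']
          exact hfstB j hjb
      subst hb
      have hblt : b < strarr.length := by omega
      rw [PySem.List.pyGet?_natCast, List.getElem?_eq_getElem hblt]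
      have hsl : PySem.List.slice strarr (some (b : Int)) (some ((b : Int) + ((1 : Nat) : Int))) = [strarr[b]] := by
        rw [PySem.List.slice_natCast_add]
        rw [List.drop_eq_getElem_cons hblt]
        rfl
      rw [hsl, pv_join_singleton]
      rfl
    · -- general branch of A
      have hsums : (PySem.List.pyRange 0 ((strarr.length : Int) - (kn : Int) + 1) 1).map
          (fun i => (PySem.List.slice (strarr.map (fun s => PySem.Str.len s)) (some i) (some (i + (kn : Int)))).sum)
          = (List.range (strarr.length - kn + 1)).map (fun j => pvS strarr kn j) := by
        rw [PySem.List.pyRange_one]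
        have ht : (((strarr.length : Int)) - (kn : Int) + 1 - 0).toNat = strarr.length - kn + 1 := by omega
        rw [ht, List.map_map]
        apply List.map_congr_left
        intro j hj
        simp only [Function.comp]
        have h0'' : ((0 : Int) + (j : Int)) = (j : Int) := by ring
        rw [h0'', PySem.List.slice_natCast_add]
        rfl
      set sums := (List.range (strarr.length - kn + 1)).map (fun j => pvS strarr kn j) with hsdef
      have hslen : sums.length = strarr.length - kn + 1 := by simp [hsdef]
      rcases hmx : PySem.List.max? sums (fun x => x) with _ | m
      · rw [PySem.List.max?_eq_none_iff] at hmx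
        rw [hmx] at hslen
        simp at hslen
      rcases hix : PySem.List.index? sums m with _ | i
      · exfalso
        have hmem := PySem.List.max?_mem hmx
        have := (PySem.List.index?_isSome_iff sums m).2 hmem
        rw [hix] at this
        simp at this
      have hAval : longest_consec_01 strarr (kn : Int)
          = PySem.Str.join "" (PySem.List.slice strarr (some (i : Int)) (some ((i : Int) + (kn : Int)))) := by
        unfold longest_consec_01
        simp only [List.length_map]
        rw [if_neg h0, if_neg hko, hsums, hmx]
        show (match PySem.List.index? sums m with
          | none => ""
          | some i => PySem.Str.join "" (PySem.List.slice strarr (some (i : Int)) (some ((i : Int) + (kn : Int))))) = _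
        rw [hix]
      rw [hAval]
      have hmax := PySem.List.max?_isMax hmx
      have hget : ∀ j, (hj : j < sums.length) → sums[j] = pvS strarr kn j := by
        intro j hj
        simp [hsdef]
      have hb : b = i := by
        refine pv_argmax_unique sums m i b hix hmax ?_ ?_ ?_
        · omega
        · intro j hj
          rw [hget j hj, hget b (by omega)]
          exact hmaxB j (by rw [hslen] at hj; omega)
        · intro j hj hjb
          rw [hget j hj, hget b (by omega)]
          exact hfstB j hjb
      subst hb
      rfl

-- ===== VERDICT (by name: the statement is the Claim_ definition above) =====
theorem longest_consec_01_spec : Claim_equal_longest_consec_01 := by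
  intro strarr k _
  unfold Spec_longest_consec_01
  exact pv_main strarr k
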